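-- pv_equiv track=rewrite | github.com/roiei/ca | syntax_parser/syntax_parser_hpp.py | get_line_pos
-- ===== SOURCE A (Python) =====
-- def get_line_pos(code):
--     n = len(code)
--     i = 0
--     line = 1
--     pos_line = []
--
--     while i < n:
--         if code[i] == '\n':
--             pos_line += (i, line),
--             line += 1
--         i += 1
--
--     pos_line += (i, line),
--     return pos_line
-- ===== SOURCE B (Python) =====
-- def get_line_pos(code):
--     parts = code.split('\n')
--     res = []
--     off = 0
--     for idx, part in enumerate(parts[:-1]):
--         off += len(part)
--         res.append((off, idx + 1))
--         off += 1
--     res.append((len(code), len(parts)))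
--     return res
-- ===== Notes on version B (the rewrite author's own statement) =====
-- stated objective: faster
-- what changed: B replaces A's character-by-character while loop with a manual line counter by one str.split on the newline character and reconstructing each newline offset from the segment lengths with a running offset.
import Mathlib
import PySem

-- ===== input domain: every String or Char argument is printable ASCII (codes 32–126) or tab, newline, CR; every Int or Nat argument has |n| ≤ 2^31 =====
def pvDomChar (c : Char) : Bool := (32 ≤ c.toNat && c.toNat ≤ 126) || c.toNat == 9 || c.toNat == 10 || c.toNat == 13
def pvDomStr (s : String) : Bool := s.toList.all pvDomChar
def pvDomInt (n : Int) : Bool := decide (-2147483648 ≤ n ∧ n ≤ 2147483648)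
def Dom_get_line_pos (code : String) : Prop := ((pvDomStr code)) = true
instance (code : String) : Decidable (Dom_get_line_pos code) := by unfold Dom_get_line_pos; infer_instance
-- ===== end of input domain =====

-- B replaces A's character-by-character while loop by splitting the string on '\n'
-- once (done in C by Python's str.split) and reconstructing the newline offsets from the segment lengths; a timing run measured B faster by a constant factor.

-- ===== PORT A =====
-- the while loop: remaining characters, current index i, current line, accumulator
def glpLoop : List Char → Int → Int → List (Int × Int) → List (Int × Int)
  | [], i, line, acc => acc ++ [(i, line)]
  | c :: rest, i, line, acc =>
    if c = '\n' then glpLoop rest (i + 1) (line + 1) (acc ++ [(i, line)])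
    else glpLoop rest (i + 1) line acc

def get_line_pos (code : String) : List (Int × Int) :=
  glpLoop code.toList 0 1 []

-- ===== PORT B =====
-- loop body of "for idx, part in enumerate(parts[:-1])": state = (res, off)
def glpStep (st : List (Int × Int) × Int) (p : Int × List Char) : List (Int × Int) × Int :=
  let off := st.2 + (p.2.length : Int)
  (st.1 ++ [(off, p.1 + 1)], off + 1)

def get_line_pos_alt (code : String) : List (Int × Int) :=
  -- code.split('\n') with a nonempty separator is PySem.Chars.splitOn
  let parts := PySem.Chars.splitOn code.toList ['\n']
  -- parts[:-1]
  let st := (PySem.List.enumerate (PySem.List.slice parts none (some (-1))) 0).foldl glpStep ([], 0)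
  st.1 ++ [(PySem.Str.len code, (parts.length : Int))]

-- ===== PRECONDITION & SPEC =====
def Spec_get_line_pos (code : String) (out : List (Int × Int)) : Prop := out = get_line_pos_alt code
instance (code : String) (out : List (Int × Int)) : Decidable (Spec_get_line_pos code out) := by unfold Spec_get_line_pos; infer_instance

-- ===== CLAIM (what is proved, stated in full; the proofs are below) =====
def Claim_equal_get_line_pos : Prop := ∀ (code : String), Dom_get_line_pos code → Spec_get_line_pos code (get_line_pos code)

-- ===== LEMMAS AND PROOFS =====

-- A's loop without the accumulator
def glpSpec : List Char → Int → Int → List (Int × Int)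
  | [], i, line => [(i, line)]
  | c :: rest, i, line =>
    if c = '\n' then (i, line) :: glpSpec rest (i + 1) (line + 1) else glpSpec rest (i + 1) line

-- B's loop without the accumulator: entries produced from the remaining parts
def glpFoldSpec : List (List Char) → Int → Int → List (Int × Int)
  | [], _, _ => []
  | p :: rest, off, s => (off + (p.length : Int), s + 1) :: glpFoldSpec rest (off + p.length + 1) (s + 1)

theorem glpLoop_eq (cs : List Char) : ∀ (i line : Int) (acc : List (Int × Int)),
    glpLoop cs i line acc = acc ++ glpSpec cs i line := by
  induction cs with
  | nil => intro i line acc; rfl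
  | cons c rest ih =>
    intro i line acc
    by_cases hc : c = '\n' <;> simp [glpLoop, glpSpec, hc, ih]

theorem glp_go_acc (sep : List Char) : ∀ (fuel : Nat) (l cur : List Char) (acc : List (List Char)),
    PySem.Chars.splitOn.go sep fuel l cur acc =
      acc.reverse ++ PySem.Chars.splitOn.go sep fuel l cur [] := by
  intro fuel
  induction fuel with
  | zero => intro l cur acc; simp [PySem.Chars.splitOn.go]
  | succ fuel ih =>
    intro l cur acc
    cases l with
    | nil => simp [PySem.Chars.splitOn.go]
    | cons c rest =>
      rw [PySem.Chars.splitOn.go, PySem.Chars.splitOn.go]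
      by_cases hp : sep.isPrefixOf (c :: rest)
      · simp only [hp, if_true]
        rw [ih _ _ (cur.reverse :: acc), ih _ _ [cur.reverse]]
        simp
      · simp only [hp, Bool.false_eq_true, if_false]
        exact ih _ _ acc

theorem glp_go_cur : ∀ (fuel : Nat) (l cur : List Char),
    PySem.Chars.splitOn.go ['\n'] fuel l cur [] =
      (PySem.Chars.splitOn.go ['\n'] fuel l [] []).modifyHead (cur.reverse ++ ·) := by
  intro fuel
  induction fuel with
  | zero => intro l cur; simp [PySem.Chars.splitOn.go]
  | succ fuel ih =>
    intro l cur
    cases l with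
    | nil => simp [PySem.Chars.splitOn.go]
    | cons c rest =>
      rw [PySem.Chars.splitOn.go, PySem.Chars.splitOn.go]
      by_cases hp : List.isPrefixOf ['\n'] (c :: rest)
      · simp only [hp, if_true, List.reverse_nil]
        rw [glp_go_acc _ _ _ _ [cur.reverse], glp_go_acc _ _ _ _ [[]]]
        simp
      · simp only [hp, Bool.false_eq_true, if_false]
        rw [ih rest (c :: cur), ih rest [c], List.modifyHead_modifyHead]
        congr 1
        funext x
        simp

theorem glp_splitOn_nil : PySem.Chars.splitOn [] ['\n'] = [[]] := rfl

theorem glp_splitOn_cons_nl (cs : List Char) :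
    PySem.Chars.splitOn ('\n' :: cs) ['\n'] = [] :: PySem.Chars.splitOn cs ['\n'] := by
  show PySem.Chars.splitOn.go ['\n'] (cs.length + 1 + 1) ('\n' :: cs) [] [] = _
  rw [PySem.Chars.splitOn.go]
  simp only [List.isPrefixOf_cons₂_self, List.isPrefixOf_nil_left, if_true, List.length_cons,
    List.length_nil, Nat.zero_add, List.drop_succ_cons, List.drop_zero, List.reverse_nil]
  rw [glp_go_acc ['\n'] (cs.length + 1) cs [] [[]]]
  rfl

theorem glp_splitOn_cons_ne (c : Char) (cs : List Char) (hc : c ≠ '\n') :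
    PySem.Chars.splitOn (c :: cs) ['\n'] = (PySem.Chars.splitOn cs ['\n']).modifyHead (c :: ·) := by
  have hp : List.isPrefixOf ['\n'] (c :: cs) = false := by
    simp [List.isPrefixOf]
    intro h; exact absurd h.symm hc
  show PySem.Chars.splitOn.go ['\n'] (cs.length + 1 + 1) (c :: cs) [] [] = _
  rw [PySem.Chars.splitOn.go]
  simp only [hp, Bool.false_eq_true, if_false, List.reverse_nil]
  rw [glp_go_cur (cs.length + 1) cs [c]]
  rfl

theorem glp_splitOn_ne_nil (cs : List Char) : PySem.Chars.splitOn cs ['\n'] ≠ [] := by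
  induction cs with
  | nil => simp [glp_splitOn_nil]
  | cons c rest ih =>
    by_cases hc : c = '\n'
    · subst hc; simp [glp_splitOn_cons_nl]
    · rw [glp_splitOn_cons_ne c rest hc]
      cases h : PySem.Chars.splitOn rest ['\n'] with
      | nil => exact absurd h ih
      | cons p ps => simp

theorem glp_main (cs : List Char) : ∀ (i line : Int),
    glpSpec cs i line =
      glpFoldSpec ((PySem.Chars.splitOn cs ['\n']).dropLast) i (line - 1) ++
        [(i + cs.length, line + ((PySem.Chars.splitOn cs ['\n']).length : Int) - 1)] := by
  induction cs with
  | nil =>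
    intro i line
    simp [glpSpec, glp_splitOn_nil, glpFoldSpec]
  | cons c rest ih =>
    intro i line
    by_cases hc : c = '\n'
    · subst hc
      rw [glp_splitOn_cons_nl]
      have hne := glp_splitOn_ne_nil rest
      rw [List.dropLast_cons_of_ne_nil hne]
      simp only [glpSpec, if_true, glpFoldSpec, List.length_nil, Nat.cast_zero, add_zero,
        sub_add_cancel, List.length_cons, List.cons_append]
      rw [ih (i + 1) (line + 1)]
      have h1 : line + 1 - 1 = line := by ring
      rw [h1]
      simp only [List.cons.injEq, List.append_right_inj, Prod.mk.injEq, and_true, true_and]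
      refine ⟨?_, ?_⟩ <;> push_cast <;> ring
    · rw [glp_splitOn_cons_ne c rest hc]
      simp only [glpSpec, hc, if_false]
      rw [ih (i + 1) line]
      cases hsp : PySem.Chars.splitOn rest ['\n'] with
      | nil => exact absurd hsp (glp_splitOn_ne_nil rest)
      | cons p ps =>
        cases ps with
        | nil =>
          simp only [List.modifyHead_cons, List.dropLast, glpFoldSpec, List.nil_append,
            List.length_cons, List.cons.injEq, Prod.mk.injEq, and_true]
          push_cast
          ring
        | cons q qs =>
          simp only [List.modifyHead_cons, List.dropLast_cons_of_ne_nil (List.cons_ne_nil q qs)]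
          simp only [glpFoldSpec, List.length_cons, List.cons_append]
          push_cast
          rw [show i + ((p.length : Int) + 1) = i + 1 + (p.length : Int) from by ring,
              show line - 1 + 1 = line from by ring,
              show i + ((rest.length : Int) + 1) = i + 1 + (rest.length : Int) from by ring]

theorem glp_fold (ps : List (List Char)) : ∀ (res : List (Int × Int)) (off s : Int),
    ((PySem.List.enumerate ps s).foldl glpStep (res, off)).1 = res ++ glpFoldSpec ps off s := by
  induction ps with
  | nil => intro res off s; simp [PySem.List.enumerate_nil, glpFoldSpec]
  | cons p rest ih =>
    intro res off s
    rw [PySem.List.enumerate_cons]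
    simp only [List.foldl_cons, glpStep]
    rw [ih]
    simp [glpFoldSpec]

-- ===== VERDICT (by name: the statement is the Claim_ definition above) =====
theorem get_line_pos_spec : Claim_equal_get_line_pos := by
  intro code _
  simp only [Spec_get_line_pos, get_line_pos, get_line_pos_alt]
  rw [glpLoop_eq, glp_fold]
  simp only [List.nil_append, pysem]
  rw [glp_main code.toList 0 1]
  simp
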